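-- pv_equiv track=rewrite | github.com/AmaySharma06/aad-project | algorithms/community/louvain.py | _compute_community_data
-- ===== SOURCE A (Python) =====
-- from typing import Dict, List, Set, Tuple, Optional
--
-- def _compute_community_data(
--
--     graph: Dict[int, List[int]],
--     partition: Dict[int, int],
--     degree: Dict[int, int]
-- ) -> Tuple[Dict[int, int], Dict[int, int]]:
--     """
--     Compute community statistics for efficient modularity gain calculation.
--
--     Returns
--     -------
--     tuple
--         (community_total_degree, community_internal_edges)
--     """
--     community_total_degree: Dict[int, int] = {}
--     community_internal_edges: Dict[int, int] = {}
--
--     for node, comm in partition.items():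
--         # Add node degree to community total
--         community_total_degree[comm] = community_total_degree.get(comm, 0) + degree[node]
--
--         # Count internal edges (edges to same community)
--         internal = 0
--         for neighbor in graph.get(node, []):
--             if partition.get(neighbor) == comm:
--                 internal += 1
--         community_internal_edges[comm] = community_internal_edges.get(comm, 0) + internal
--
--     return community_total_degree, community_internal_edges
-- ===== SOURCE B (Python) =====
-- def _compute_community_data(graph, partition, degree):
--     # Index-first: group nodes by community, then aggregate per community.
--     members = {}
--     for node, comm in partition.items():
--         members.setdefault(comm, []).append(node)
--     community_total_degree = {c: sum(degree[n] for n in ns)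
--                               for c, ns in members.items()}
--     community_internal_edges = {c: sum(1 for n in ns
--                                          for nb in graph.get(n, [])
--                                          if partition.get(nb) == c)
--                                 for c, ns in members.items()}
--     return community_total_degree, community_internal_edges
-- ===== Notes on version B (the rewrite author's own statement) =====
-- stated objective: alternative
-- what changed: Replaces A's fused per-node pass that accumulates both dicts entry-by-entry with an index-first decomposition: group nodes by community into a members index, then build each result dict in one comprehension per community.
import Mathlib
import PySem

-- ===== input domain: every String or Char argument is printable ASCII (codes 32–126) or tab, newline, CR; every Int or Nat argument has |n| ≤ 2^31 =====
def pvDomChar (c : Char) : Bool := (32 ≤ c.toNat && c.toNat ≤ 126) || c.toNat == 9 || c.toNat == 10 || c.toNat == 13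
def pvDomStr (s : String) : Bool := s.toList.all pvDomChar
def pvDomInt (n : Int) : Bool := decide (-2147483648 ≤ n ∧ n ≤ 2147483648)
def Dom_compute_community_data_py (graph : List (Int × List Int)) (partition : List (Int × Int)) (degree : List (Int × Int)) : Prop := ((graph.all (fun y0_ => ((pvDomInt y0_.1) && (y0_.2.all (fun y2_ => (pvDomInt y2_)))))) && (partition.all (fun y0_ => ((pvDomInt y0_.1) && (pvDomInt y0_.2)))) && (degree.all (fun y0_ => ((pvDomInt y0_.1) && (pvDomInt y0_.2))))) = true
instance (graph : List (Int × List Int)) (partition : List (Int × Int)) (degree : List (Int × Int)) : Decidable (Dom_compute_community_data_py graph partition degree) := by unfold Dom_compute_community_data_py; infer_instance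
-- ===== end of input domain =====

-- ===== PORT A =====
-- B regroups the work community-first (build a community→members index, then aggregate
-- per community) instead of A's fused per-node pass; objective: alternative decomposition.
def compute_community_data_py (graph : List (Int × List Int)) (partition : List (Int × Int)) (degree : List (Int × Int)) : (List (Int × Int)) × (List (Int × Int)) :=
  let G := PySem.Dict.ofList graph
  let P := PySem.Dict.ofList partition
  let Deg := PySem.Dict.ofList degree
  -- for node, comm in partition.items(): update both dicts
  let res := P.items.foldl (fun (st : PySem.Dict Int Int × PySem.Dict Int Int) nc =>
      (st.1.insert nc.2 (st.1.getD nc.2 0 + Deg.getD nc.1 0),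
       st.2.insert nc.2 (st.2.getD nc.2 0 +
         -- internal = 0; for neighbor in graph.get(node, []): if partition.get(neighbor) == comm: internal += 1
         (G.getD nc.1 []).foldl (fun internal nb => if P.get? nb == some nc.2 then internal + 1 else internal) 0)))
    (PySem.Dict.empty, PySem.Dict.empty)
  (res.1.items, res.2.items)

-- ===== PORT B =====
def compute_community_data_py_alt (graph : List (Int × List Int)) (partition : List (Int × Int)) (degree : List (Int × Int)) : (List (Int × Int)) × (List (Int × Int)) :=
  let G := PySem.Dict.ofList graph
  let P := PySem.Dict.ofList partition
  let Deg := PySem.Dict.ofList degree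
  -- members.setdefault(comm, []).append(node)
  let members := P.items.foldl (fun (m : PySem.Dict Int (List Int)) nc => m.modify nc.2 [] (· ++ [nc.1])) PySem.Dict.empty
  -- {c: sum(degree[n] for n in ns) for c, ns in members.items()}  (keys already distinct)
  let ctd := members.items.map (fun cns => (cns.1, (cns.2.map (fun n => Deg.getD n 0)).sum))
  -- {c: sum(1 for n in ns for nb in graph.get(n, []) if partition.get(nb) == c) for c, ns in members.items()}
  let cie := members.items.map (fun cns => (cns.1,
      (cns.2.map (fun n => (((G.getD n []).countP (fun nb => P.get? nb == some cns.1) : Nat) : Int))).sum))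
  (ctd, cie)

-- ===== PRECONDITION & SPEC =====
-- Pre_ excludes exactly the inputs where Python A raises KeyError: a node that is a key of
-- partition but not a key of degree (degree[node]).
def Pre_compute_community_data_py (graph : List (Int × List Int)) (partition : List (Int × Int)) (degree : List (Int × Int)) : Prop :=
  ∀ p ∈ partition, ∃ q ∈ degree, q.1 = p.1
instance (graph : List (Int × List Int)) (partition : List (Int × Int)) (degree : List (Int × Int)) : Decidable (Pre_compute_community_data_py graph partition degree) := by unfold Pre_compute_community_data_py; infer_instance
def pvWitness_compute_community_data_py : (List (Int × List Int)) × (List (Int × Int)) × (List (Int × Int)) :=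
  ([(1, [2, 3]), (2, [1]), (3, [1])], [(1, 0), (2, 0), (3, 1)], [(1, 2), (2, 1), (3, 1)])
def Spec_compute_community_data_py (graph : List (Int × List Int)) (partition : List (Int × Int)) (degree : List (Int × Int)) (out : (List (Int × Int)) × (List (Int × Int))) : Prop := out = compute_community_data_py_alt graph partition degree
instance (graph : List (Int × List Int)) (partition : List (Int × Int)) (degree : List (Int × Int)) (out : (List (Int × Int)) × (List (Int × Int))) : Decidable (Spec_compute_community_data_py graph partition degree out) := by unfold Spec_compute_community_data_py; infer_instance

-- ===== CLAIM (what is proved, stated in full; the proofs are below) =====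
def Claim_equal_compute_community_data_py : Prop := ∀ (graph : List (Int × List Int)) (partition : List (Int × Int)) (degree : List (Int × Int)), Dom_compute_community_data_py graph partition degree → Pre_compute_community_data_py graph partition degree → Spec_compute_community_data_py graph partition degree (compute_community_data_py graph partition degree)

-- ===== LEMMAS AND PROOFS =====

-- Running value of A's insert-accumulate loop at a key c.
theorem getD_afold (l : List (Int × Int)) (d : PySem.Dict Int Int) (g : Int × Int → Int) (c : Int) :
    (l.foldl (fun d nc => d.insert nc.2 (d.getD nc.2 0 + g nc)) d).getD c 0
      = d.getD c 0 + ((l.filter (fun nc => nc.2 == c)).map g).sum := by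
  induction l generalizing d with
  | nil => simp
  | cons nc rest ih =>
    simp only [List.foldl_cons, List.filter_cons, ih, PySem.Dict.getD_insert]
    by_cases h : nc.2 = c
    · simp [h, add_assoc]
    · have h' : ¬c = nc.2 := fun e => h e.symm
      simp [h, h']

-- A's insert-accumulate loop from empty, characterised: one entry per distinct community,
-- in first-occurrence order, holding the sum of g over that community's items.
theorem items_afold (l : List (Int × Int)) (g : Int × Int → Int) :
    (l.foldl (fun d nc => d.insert nc.2 (d.getD nc.2 0 + g nc)) PySem.Dict.empty).items
      = (PySem.Set.ofList (l.map (·.2))).map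
          (fun c => (c, ((l.filter (fun nc => nc.2 == c)).map g).sum)) := by
  have hk : (l.foldl (fun d nc => d.insert nc.2 (d.getD nc.2 0 + g nc)) PySem.Dict.empty).keys
      = PySem.Set.ofList (l.map (·.2)) := by
    rw [PySem.Dict.keys_foldl_insert_key l (·.2) (fun d nc => d.getD nc.2 0 + g nc),
        PySem.Dict.keys_empty, PySem.Set.update_nil_left]
  rw [PySem.Dict.items_eq_map_keys _ (by rw [hk]; exact PySem.Set.nodup_ofList _) 0, hk]
  apply List.map_congr_left
  intro c _
  rw [getD_afold]
  simp

-- Running value of B's grouping loop at a key c.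
theorem getD_members (l : List (Int × Int)) (m : PySem.Dict Int (List Int)) (c : Int) :
    (l.foldl (fun m nc => m.modify nc.2 [] (· ++ [nc.1])) m).getD c []
      = m.getD c [] ++ (l.filter (fun nc => nc.2 == c)).map (·.1) := by
  induction l generalizing m with
  | nil => simp
  | cons nc rest ih =>
    simp only [List.foldl_cons, List.filter_cons, ih, PySem.Dict.getD_modify]
    by_cases h : nc.2 = c
    · simp [h]
    · have h' : ¬c = nc.2 := fun e => h e.symm
      simp [h, h']

-- B's grouping loop from empty, characterised: one entry per distinct community,
-- in first-occurrence order, holding that community's member nodes in order.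
theorem items_members (l : List (Int × Int)) :
    (l.foldl (fun (m : PySem.Dict Int (List Int)) nc => m.modify nc.2 [] (· ++ [nc.1])) PySem.Dict.empty).items
      = (PySem.Set.ofList (l.map (·.2))).map
          (fun c => (c, (l.filter (fun nc => nc.2 == c)).map (·.1))) := by
  have hk : (l.foldl (fun (m : PySem.Dict Int (List Int)) nc => m.modify nc.2 [] (· ++ [nc.1])) PySem.Dict.empty).keys
      = PySem.Set.ofList (l.map (·.2)) := by
    rw [PySem.Dict.keys_foldl_modify_key l (·.2) [] (fun _ nc v => v ++ [nc.1]),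
        PySem.Dict.keys_empty, PySem.Set.update_nil_left]
  rw [PySem.Dict.items_eq_map_keys _ (by rw [hk]; exact PySem.Set.nodup_ofList _) [], hk]
  apply List.map_congr_left
  intro c _
  rw [getD_members]
  simp

-- ===== VERDICT (by name: the statement is the Claim_ definition above) =====
theorem compute_community_data_py_spec : Claim_equal_compute_community_data_py := by
  intro graph partition degree _ _
  unfold Spec_compute_community_data_py compute_community_data_py compute_community_data_py_alt
  dsimp only
  set G := PySem.Dict.ofList graph
  set P := PySem.Dict.ofList partition
  set Deg := PySem.Dict.ofList degree
  have hsplit := PySem.List.foldl_prod_mk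
       (f := fun (d : PySem.Dict Int Int) (nc : Int × Int) => d.insert nc.2 (d.getD nc.2 0 + Deg.getD nc.1 0))
       (g := fun (d : PySem.Dict Int Int) (nc : Int × Int) => d.insert nc.2 (d.getD nc.2 0 +
         (G.getD nc.1 []).foldl (fun internal nb => if P.get? nb == some nc.2 then internal + 1 else internal) 0))
       (l := P.items) (a := PySem.Dict.empty) (b := PySem.Dict.empty)
  rw [hsplit]
  dsimp only
  rw [items_afold, items_afold, items_members]
  refine Prod.ext ?_ ?_ <;> dsimp only
  · rw [List.map_map]
    apply List.map_congr_left
    intro c _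
    simp [Function.comp_def, List.map_map]
  · rw [List.map_map]
    apply List.map_congr_left
    intro c _
    simp only [Function.comp_def, List.map_map]
    refine congrArg _ (congrArg _ ?_)
    apply List.map_congr_left
    intro nc hnc
    have hc : nc.2 = c := by simpa using (List.mem_filter.mp hnc).2
    simp only [hc, PySem.List.foldl_count_if, zero_add]
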